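-- pv_equiv track=rewrite | github.com/crungelab/cxbind | plugins/clang/cxbind_plugin_clang/frontend/functional_builder.py | _replace_outer_template_args
-- ===== SOURCE A (Python) =====
-- def _find_matching_angle(s: str, lt: int) -> int:
--     depth = 0
--     for i in range(lt, len(s)):
--         if s[i] == "<":
--             depth += 1
--         elif s[i] == ">":
--             depth -= 1
--             if depth == 0:
--                 return i
--     return -1
--
-- def _split_template_args(arg_str: str) -> list[str]:
--     args: list[str] = []
--     depth = 0
--     start = 0
--     for i, c in enumerate(arg_str):
--         if c == "<":
--             depth += 1
--         elif c == ">":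
--             depth -= 1
--         elif c == "," and depth == 0:
--             args.append(arg_str[start:i].strip())
--             start = i + 1
--     tail = arg_str[start:].strip()
--     if tail:
--         args.append(tail)
--     return args
--
-- def _replace_outer_template_args(fq: str, resolved_args: list[str]) -> str:
--     lt = fq.find("<")
--     if lt == -1:
--         return fq
--     gt = _find_matching_angle(fq, lt)
--     if gt == -1:
--         return fq
--
--     fq_args = _split_template_args(fq[lt + 1 : gt])
--     out_args = fq_args[:]
--     for i in range(min(len(out_args), len(resolved_args))):
--         out_args[i] = resolved_args[i]
--
--     return f"{fq[:lt]}<{', '.join(out_args)}>{fq[gt + 1:]}"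
-- ===== SOURCE B (Python) =====
-- def _replace_outer_template_args(fq: str, resolved_args: list[str]) -> str:
--     # One fused pass: after the first '<', a single depth-counting loop both finds the
--     # matching '>' and collects the top-level argument pieces at the same time.
--     lt = fq.find("<")
--     if lt == -1:
--         return fq
--     rest = fq[lt + 1:]
--     pieces: list[str] = []
--     cur: list[str] = []
--     depth = 1
--     suffix = None
--     for j, c in enumerate(rest):
--         if c == "<":
--             depth += 1
--             cur.append(c)
--         elif c == ">":
--             depth -= 1
--             if depth == 0:
--                 suffix = rest[j + 1:]
--                 break
--             cur.append(c)
--         elif c == "," and depth == 1: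
--             pieces.append("".join(cur).strip())
--             cur = []
--         else:
--             cur.append(c)
--     if suffix is None:
--         return fq
--     tail = "".join(cur).strip()
--     args = pieces + ([tail] if tail else [])
--     k = min(len(args), len(resolved_args))
--     args[:k] = resolved_args[:k]
--     return fq[:lt] + "<" + ", ".join(args) + ">" + suffix
-- ===== Notes on version B (the rewrite author's own statement) =====
-- stated objective: alternative
-- what changed: A's two separate depth-counting scans (find the matching '>' , then re-scan the extracted substring to split top-level arguments) are fused into a single pass from the first '<' that collects the stripped argument pieces while locating the matching '>', and the partial overwrite loop is replaced by take/drop list surgery.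
import Mathlib
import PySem

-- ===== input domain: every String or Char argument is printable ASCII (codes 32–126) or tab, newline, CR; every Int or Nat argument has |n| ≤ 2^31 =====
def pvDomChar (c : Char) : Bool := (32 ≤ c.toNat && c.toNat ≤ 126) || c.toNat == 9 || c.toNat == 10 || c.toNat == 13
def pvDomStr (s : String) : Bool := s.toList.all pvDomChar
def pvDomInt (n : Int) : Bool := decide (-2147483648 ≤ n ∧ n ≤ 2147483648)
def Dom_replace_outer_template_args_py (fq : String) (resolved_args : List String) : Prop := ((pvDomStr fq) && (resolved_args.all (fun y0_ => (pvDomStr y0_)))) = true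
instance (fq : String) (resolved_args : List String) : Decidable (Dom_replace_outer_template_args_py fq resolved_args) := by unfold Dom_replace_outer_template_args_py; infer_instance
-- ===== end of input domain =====

-- B fuses A's two depth-counting scans (find matching '>' + split top-level args) into one
-- pass that collects the argument pieces while locating the matching '>'.  Objective: alternative
-- decomposition (single pass instead of two scans); return value only, no side effects.

-- ===== PORT A =====
-- _find_matching_angle: for i in range(lt, len(s)) with a depth counter; -1 if no match.
def pvFmaGo (rem : List Char) (depth : Int) (i : Int) : Int :=
  match rem with
  | [] => -1
  | c :: rest =>
    if c = '<' then pvFmaGo rest (depth + 1) (i + 1)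
    else if c = '>' then
      if depth - 1 = 0 then i else pvFmaGo rest (depth - 1) (i + 1)
    else pvFmaGo rest depth (i + 1)

def pvFindMatchingAngle (s : List Char) (lt : Nat) : Int :=
  pvFmaGo (s.drop lt) 0 (lt : Int)

-- _split_template_args: enumerate(arg_str) keeping (args, depth, start); slices arg_str[start:i].
def pvSplitGo (full rem : List Char) (i start : Nat) (depth : Int)
    (args : List (List Char)) : List (List Char) :=
  match rem with
  | [] =>
    let tail := PySem.Chars.strip (full.drop start)
    if tail = [] then args else args ++ [tail]
  | c :: rest =>
    if c = '<' then pvSplitGo full rest (i + 1) start (depth + 1) args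
    else if c = '>' then pvSplitGo full rest (i + 1) start (depth - 1) args
    else if c = ',' ∧ depth = 0 then
      pvSplitGo full rest (i + 1) (i + 1) depth
        (args ++ [PySem.Chars.strip ((full.drop start).take (i - start))])
    else pvSplitGo full rest (i + 1) start depth args

def pvSplitTemplateArgs (arg_str : List Char) : List (List Char) :=
  pvSplitGo arg_str arg_str 0 0 0 []

-- for i in range(min(len(out_args), len(resolved_args))): out_args[i] = resolved_args[i]
def pvSetLoop (out res : List (List Char)) : List (List Char) :=
  (PySem.List.pyRange 0 ((min out.length res.length : Nat) : Int) 1).foldl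
    (fun acc i => acc.set i.toNat (PySem.List.pyGetD res i [])) out

def replace_outer_template_args_py (fq : String) (resolved_args : List String) : String :=
  let s := fq.toList
  let lt := PySem.Chars.find s ['<']
  if lt = -1 then fq
  else
    let gt := pvFindMatchingAngle s lt.toNat
    if gt = -1 then fq
    else
      let fq_args := pvSplitTemplateArgs (PySem.Chars.slice s (some (lt + 1)) (some gt))
      let out_args := pvSetLoop fq_args (resolved_args.map String.toList)
      String.ofList (s.take lt.toNat ++ '<' :: PySem.Chars.join [',', ' '] out_args
                 ++ '>' :: s.drop (gt.toNat + 1))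

-- ===== PORT B =====
-- the fused pass: depth counter, current-piece accumulator, collected pieces;
-- stops at the matching '>' returning (pieces, current piece, suffix after '>'), none if unbalanced.
def pvFusedGo (rem : List Char) (depth : Int) (cur : List Char)
    (pieces : List (List Char)) : Option (List (List Char) × List Char × List Char) :=
  match rem with
  | [] => none
  | c :: rest =>
    if c = '<' then pvFusedGo rest (depth + 1) (cur ++ [c]) pieces
    else if c = '>' then
      if depth - 1 = 0 then some (pieces, cur, rest)
      else pvFusedGo rest (depth - 1) (cur ++ [c]) pieces
    else if c = ',' ∧ depth = 1 then
      pvFusedGo rest depth [] (pieces ++ [PySem.Chars.strip cur])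
    else pvFusedGo rest depth (cur ++ [c]) pieces

def replace_outer_template_args_py_alt (fq : String) (resolved_args : List String) : String :=
  let s := fq.toList
  let lt := PySem.Chars.find s ['<']
  if lt = -1 then fq
  else
    match pvFusedGo (s.drop (lt.toNat + 1)) 1 [] [] with
    | none => fq
    | some (pieces, cur, suffix) =>
      let tail := PySem.Chars.strip cur
      let args0 := pieces ++ (if tail = [] then [] else [tail])
      let res := resolved_args.map String.toList
      let k := min args0.length res.length
      let args := res.take k ++ args0.drop k
      String.ofList (s.take lt.toNat ++ '<' :: PySem.Chars.join [',', ' '] args ++ '>' :: suffix)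

-- ===== PRECONDITION & SPEC =====
def Spec_replace_outer_template_args_py (fq : String) (resolved_args : List String) (out : String) : Prop := out = replace_outer_template_args_py_alt fq resolved_args
instance (fq : String) (resolved_args : List String) (out : String) : Decidable (Spec_replace_outer_template_args_py fq resolved_args out) := by unfold Spec_replace_outer_template_args_py; infer_instance

-- ===== CLAIM (what is proved, stated in full; the proofs are below) =====
def Claim_equal_replace_outer_template_args_py : Prop := ∀ (fq : String) (resolved_args : List String), Dom_replace_outer_template_args_py fq resolved_args → Spec_replace_outer_template_args_py fq resolved_args (replace_outer_template_args_py fq resolved_args)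

-- ===== LEMMAS AND PROOFS =====
-- reference splitter of the region before the matching '>': (p, q) with rem = p ++ '>' :: q
def pvClose? (rem : List Char) (depth : Int) : Option (List Char × List Char) :=
  match rem with
  | [] => none
  | c :: rest =>
    if c = '<' then (pvClose? rest (depth + 1)).map (fun pq => (c :: pq.1, pq.2))
    else if c = '>' then
      if depth - 1 = 0 then some ([], rest)
      else (pvClose? rest (depth - 1)).map (fun pq => (c :: pq.1, pq.2))
    else (pvClose? rest depth).map (fun pq => (c :: pq.1, pq.2))

-- split kernel on the inner region, carrying the current piece instead of index slices
def pvSplitCore (rem : List Char) (depth : Int) (cur : List Char)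
    (args : List (List Char)) : List (List Char) × List Char :=
  match rem with
  | [] => (args, cur)
  | c :: rest =>
    if c = '<' then pvSplitCore rest (depth + 1) (cur ++ [c]) args
    else if c = '>' then pvSplitCore rest (depth - 1) (cur ++ [c]) args
    else if c = ',' ∧ depth = 0 then
      pvSplitCore rest depth [] (args ++ [PySem.Chars.strip cur])
    else pvSplitCore rest depth (cur ++ [c]) args

theorem pvClose?_decomp (rem : List Char) : ∀ (depth : Int) (p q : List Char),
    pvClose? rem depth = some (p, q) → rem = p ++ '>' :: q := by
  induction rem with
  | nil => intro d p q h; simp [pvClose?] at h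
  | cons c rest ih =>
    intro d p q h
    simp only [pvClose?] at h
    split_ifs at h with h1 h2 h3
    · cases hr : pvClose? rest (d + 1) with
      | none => rw [hr] at h; simp at h
      | some pq =>
        rw [hr] at h; simp at h
        obtain ⟨hp, hq⟩ := h
        subst hp hq h1
        simpa using ih _ _ _ hr
    · simp at h; obtain ⟨hp, hq⟩ := h; subst hp hq h2; simp
    · cases hr : pvClose? rest (d - 1) with
      | none => rw [hr] at h; simp at h
      | some pq =>
        rw [hr] at h; simp at h
        obtain ⟨hp, hq⟩ := h
        subst hp hq h2
        simpa using ih _ _ _ hr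
    · cases hr : pvClose? rest d with
      | none => rw [hr] at h; simp at h
      | some pq =>
        rw [hr] at h; simp at h
        obtain ⟨hp, hq⟩ := h
        subst hp hq
        simpa using ih _ _ _ hr

theorem pvFmaGo_eq_close (rem : List Char) : ∀ (depth : Int) (i : Int),
    pvFmaGo rem depth i =
      (match pvClose? rem depth with
       | none => -1
       | some (p, _) => i + p.length) := by
  induction rem with
  | nil => intro d i; simp [pvFmaGo, pvClose?]
  | cons c rest ih =>
    intro d i
    simp only [pvFmaGo, pvClose?]
    split_ifs with h1 h2 h3
    · rw [ih]; cases hr : pvClose? rest (d + 1) <;> simp <;> try ring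
    · simp
    · rw [ih]; cases hr : pvClose? rest (d - 1) <;> simp <;> try ring
    · rw [ih]; cases hr : pvClose? rest d <;> simp <;> try ring

theorem pvFusedGo_eq (rem : List Char) : ∀ (depth : Int) (cur : List Char)
    (pieces : List (List Char)),
    pvFusedGo rem depth cur pieces =
      (pvClose? rem depth).map (fun pq =>
        ((pvSplitCore pq.1 (depth - 1) cur pieces).1,
         (pvSplitCore pq.1 (depth - 1) cur pieces).2, pq.2)) := by
  induction rem with
  | nil => intro d cur pieces; simp [pvFusedGo, pvClose?]
  | cons c rest ih =>
    intro d cur pieces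
    simp only [pvFusedGo, pvClose?]
    split_ifs with h1 h2 h3 h4
    · rw [ih]
      cases hr : pvClose? rest (d + 1) with
      | none => simp
      | some pq =>
        simp only [Option.map_some]
        subst h1
        have : pvSplitCore ('<' :: pq.1) (d - 1) cur pieces
            = pvSplitCore pq.1 (d + 1 - 1) (cur ++ ['<']) pieces := by
          simp only [pvSplitCore]; ring_nf; simp
        rw [this]
    · simp [pvSplitCore]
    · rw [ih]
      cases hr : pvClose? rest (d - 1) with
      | none => simp
      | some pq =>
        simp only [Option.map_some]
        subst h2
        have : pvSplitCore ('>' :: pq.1) (d - 1) cur pieces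
            = pvSplitCore pq.1 (d - 1 - 1) (cur ++ ['>']) pieces := by
          simp only [pvSplitCore]; ring_nf; simp
        rw [this]
    · obtain ⟨hc, hd⟩ := h4
      subst hc hd
      rw [ih]
      cases hr : pvClose? rest 1 with
      | none => simp
      | some pq =>
        simp only [Option.map_some]
        have : pvSplitCore (',' :: pq.1) (1 - 1) cur pieces
            = pvSplitCore pq.1 (1 - 1) [] (pieces ++ [PySem.Chars.strip cur]) := by
          simp [pvSplitCore]
        rw [this]
    · rw [ih]
      cases hr : pvClose? rest d with
      | none => simp
      | some pq =>
        simp only [Option.map_some]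
        have : pvSplitCore (c :: pq.1) (d - 1) cur pieces
            = pvSplitCore pq.1 (d - 1) (cur ++ [c]) pieces := by
          have hd4 : ¬ (c = ',' ∧ d - 1 = 0) := by
            intro hcd
            exact h4 ⟨hcd.1, by omega⟩
          simp only [pvSplitCore, if_neg h1, if_neg h2, if_neg hd4]
        rw [this]

theorem pvSetAux (out res : List (List Char)) : ∀ (k : Nat), k ≤ out.length → k ≤ res.length →
    (PySem.List.pyRange 0 (k : Int) 1).foldl
      (fun acc i => acc.set i.toNat (PySem.List.pyGetD res i [])) out
    = res.take k ++ out.drop k := by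
  intro k
  induction k with
  | zero => intro _ _; simp
  | succ k ih =>
    intro hk1 hk2
    have h1 : (0:Int) ≤ k := by positivity
    have hsplit : PySem.List.pyRange 0 ((k:Int) + 1) 1
        = PySem.List.pyRange 0 (k:Int) 1 ++ [(k:Int)] := by
      exact PySem.List.pyRange_one_succ_right h1
    push_cast
    rw [hsplit, List.foldl_append, ih (by omega) (by omega)]
    simp only [List.foldl_cons, List.foldl_nil]
    have hget : PySem.List.pyGetD res (k:Int) [] = res[k]'(by omega) :=
      PySem.List.pyGetD_ofNat res k [] (by omega)
    have htoNat : ((k:Int)).toNat = k := by omega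
    rw [hget, htoNat]
    have hlen : (res.take k).length = k := by simp; omega
    have hset : (res.take k ++ out.drop k).set k (res[k]'(by omega))
        = res.take k ++ (out.drop k).set 0 (res[k]'(by omega)) := by
      rw [List.set_append]
      simp [hlen]
    rw [hset]
    obtain ⟨a, t, ht⟩ : ∃ a t, out.drop k = a :: t := by
      cases h : out.drop k with
      | nil =>
        exfalso
        have := List.length_drop (l := out) (i := k)
        rw [h] at this; simp at this; omega
      | cons a t => exact ⟨a, t, rfl⟩
    rw [ht]
    have hdrop : out.drop (k+1) = t := by
      have h := congrArg (List.drop 1) ht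
      simp at h
      simpa [Nat.add_comm] using h
    have htake : res.take (k+1) = res.take k ++ [res[k]'(by omega)] := by
      rw [List.take_add_one]
      simp [List.getElem?_eq_getElem (by omega : k < res.length)]
    rw [hdrop, htake, List.append_assoc]
    rfl

theorem pvSetLoop_eq (out res : List (List Char)) :
    pvSetLoop out res =
      res.take (min out.length res.length) ++ out.drop (min out.length res.length) := by
  unfold pvSetLoop
  exact pvSetAux out res _ (by omega) (by omega)

theorem pvSplitGo_eq_core (rem : List Char) : ∀ (full : List Char) (i start : Nat)
    (depth : Int) (args : List (List Char)), full.drop i = rem → start ≤ i → i ≤ full.length →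
    pvSplitGo full rem i start depth args =
      (let r := pvSplitCore rem depth ((full.drop start).take (i - start)) args
       let tail := PySem.Chars.strip r.2
       if tail = [] then r.1 else r.1 ++ [tail]) := by
  induction rem with
  | nil =>
    intro full i start depth args hdrop hsi hlen
    have hi : i = full.length := by
      have := congrArg List.length hdrop
      simp at this; omega
    have htake : (full.drop start).take (i - start) = full.drop start := by
      apply List.take_of_length_le
      simp; omega
    simp [pvSplitGo, pvSplitCore, htake]
  | cons c rest ih =>
    intro full i start depth args hdrop hsi hlen
    have hilt : i < full.length := by
      have := congrArg List.length hdrop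
      simp at this; omega
    have hdrop1 : full.drop (i + 1) = rest := by
      have h := congrArg (List.drop 1) hdrop
      simp at h; simpa [Nat.add_comm] using h
    have hgetc : full[i]'hilt = c := by
      have h0 : (full.drop i)[0]'(by rw [hdrop]; simp) = c := by simp [hdrop]
      simpa using h0
    have hext : (full.drop start).take (i + 1 - start)
        = (full.drop start).take (i - start) ++ [c] := by
      have h1 : i + 1 - start = (i - start) + 1 := by omega
      rw [h1, List.take_add_one]
      have h2 : (full.drop start)[i - start]? = some c := by
        rw [List.getElem?_drop]
        have hsum : start + (i - start) = i := by omega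
        rw [hsum, List.getElem?_eq_getElem hilt, hgetc]
      simp [h2]
    by_cases h1 : c = '<'
    · subst h1
      simp only [pvSplitGo, pvSplitCore]
      rw [ih _ _ _ _ _ hdrop1 (by omega) (by omega), hext]
      simp
    · by_cases h2 : c = '>'
      · subst h2
        have hne : ¬('>':Char) = '<' := by decide
        simp only [pvSplitGo, pvSplitCore, if_neg hne]
        rw [ih _ _ _ _ _ hdrop1 (by omega) (by omega), hext]
        simp
      · by_cases h3 : c = ',' ∧ depth = 0
        · obtain ⟨hc, hd⟩ := h3
          subst hc hd
          have hne1 : ¬(',':Char) = '<' := by decide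
          have hne2 : ¬(',':Char) = '>' := by decide
          simp only [pvSplitGo, pvSplitCore, if_neg hne1, if_neg hne2]
          rw [ih _ _ _ _ _ hdrop1 (by omega) (by omega)]
          simp
        · simp only [pvSplitGo, pvSplitCore, if_neg h1, if_neg h2, if_neg h3]
          rw [ih _ _ _ _ _ hdrop1 (by omega) (by omega), hext]

-- ===== VERDICT (by name: the statement is the Claim_ definition above) =====
theorem replace_outer_template_args_py_spec : Claim_equal_replace_outer_template_args_py := by
  unfold Claim_equal_replace_outer_template_args_py
  intro fq resolved_args _
  unfold Spec_replace_outer_template_args_py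
  unfold replace_outer_template_args_py replace_outer_template_args_py_alt
  by_cases hlt : PySem.Chars.find fq.toList ['<'] = -1
  · simp [hlt]
  · simp only [if_neg hlt]
    have hnn : 0 ≤ PySem.Chars.find fq.toList ['<'] := by
      have := PySem.Chars.neg_one_le_find fq.toList ['<']
      omega
    set lt : Int := PySem.Chars.find fq.toList ['<'] with hltdef
    have hcast : ((lt.toNat : Int)) = lt := Int.toNat_of_nonneg hnn
    obtain ⟨hpre, -⟩ := PySem.Chars.find_spec hnn
    obtain ⟨cs, hcs⟩ := hpre
    have hdropLt : fq.toList.drop lt.toNat = '<' :: cs := by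
      simpa using hcs.symm
    have hdrop1 : fq.toList.drop (lt.toNat + 1) = cs := by
      have h := congrArg (List.drop 1) hdropLt
      simp at h
      simpa [Nat.add_comm] using h
    have hfma0 : pvFindMatchingAngle fq.toList lt.toNat
        = pvFmaGo cs 1 ((lt.toNat : Int) + 1) := by
      unfold pvFindMatchingAngle
      rw [hdropLt]
      simp only [pvFmaGo, reduceIte]
      norm_num
    have hfused : pvFusedGo (fq.toList.drop (lt.toNat + 1)) 1 [] []
        = (pvClose? cs 1).map (fun pq =>
            ((pvSplitCore pq.1 0 [] []).1, (pvSplitCore pq.1 0 [] []).2, pq.2)) := by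
      rw [hdrop1, pvFusedGo_eq]
      norm_num
    cases hcl : pvClose? cs 1 with
    | none =>
      have hgt : pvFindMatchingAngle fq.toList lt.toNat = -1 := by
        rw [hfma0, pvFmaGo_eq_close, hcl]
      rw [hfused, hcl]
      simp [hgt]
    | some pq =>
      obtain ⟨p, q⟩ := pq
      have hgt : pvFindMatchingAngle fq.toList lt.toNat = (lt.toNat : Int) + 1 + p.length := by
        rw [hfma0, pvFmaGo_eq_close, hcl]
      have hgt_ne : pvFindMatchingAngle fq.toList lt.toNat ≠ -1 := by
        rw [hgt]; omega
      have hcs_eq : cs = p ++ '>' :: q := pvClose?_decomp cs 1 p q hcl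
      rw [if_neg hgt_ne, hfused, hcl]
      simp only [Option.map_some]
      have hgt_toNat : (pvFindMatchingAngle fq.toList lt.toNat).toNat
          = lt.toNat + 1 + p.length := by
        rw [hgt]; omega
      have hslice : PySem.Chars.slice fq.toList (some (lt + 1))
          (some (pvFindMatchingAngle fq.toList lt.toNat)) = p := by
        rw [PySem.Chars.slice_eq_listSlice,
          PySem.List.slice_toNat _ (by omega) (by rw [hgt]; omega)]
        have h1 : (lt + 1).toNat = lt.toNat + 1 := by omega
        rw [h1, hdrop1, hgt_toNat]
        have h2 : lt.toNat + 1 + p.length - (lt.toNat + 1) = p.length := by omega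
        rw [h2, hcs_eq]
        exact List.take_left
      rw [hslice]
      have hsplit : pvSplitTemplateArgs p
          = (pvSplitCore p 0 [] []).1
            ++ (if PySem.Chars.strip (pvSplitCore p 0 [] []).2 = [] then []
                else [PySem.Chars.strip (pvSplitCore p 0 [] []).2]) := by
        unfold pvSplitTemplateArgs
        rw [pvSplitGo_eq_core p p 0 0 0 [] (by simp) (by omega) (by omega)]
        simp only [List.drop_zero, Nat.sub_self, List.take_zero]
        by_cases hz : PySem.Chars.strip (pvSplitCore p 0 [] []).2 = [] <;> simp [hz]
      rw [hsplit, pvSetLoop_eq]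
      have hsuffix : fq.toList.drop
          ((pvFindMatchingAngle fq.toList lt.toNat).toNat + 1) = q := by
        rw [hgt_toNat]
        have h1 : lt.toNat + 1 + p.length + 1
            = (lt.toNat + 1) + (p.length + 1) := by omega
        rw [h1, ← List.drop_drop, hdrop1, hcs_eq, ← List.drop_drop,
          List.drop_left]
        simp
      rw [hsuffix]
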